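-- pv_equiv track=rewrite | github.com/somexing/S-N-S- | getvalueablefans.py | get_need_deepdig_sub
-- ===== SOURCE A (Python) =====
-- focus_value = 3 #关注度超过多少，才会进一步挖掘
--
-- def get_need_deepdig_sub(sub_id_focus_pair_list):
--    focus_sub_id_list = []
--    for  _pair in sub_id_focus_pair_list:
--          sub_id = _pair[0]
--          focus_num = _pair[1]
--          focus_sub_id_list.append(sub_id)
--          if focus_num < focus_value : #只挖关注度值高于 focus_value 的用户
--            break           #for the list is sorted by focus_num
--    return focus_sub_id_list
-- ===== SOURCE B (Python) =====
-- focus_value = 3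
--
-- def get_need_deepdig_sub(sub_id_focus_pair_list):
--     # find the first index whose focus drops below the threshold (None if no such element)
--     cut = next((i for i, p in enumerate(sub_id_focus_pair_list) if p[1] < focus_value), None)
--     if cut is None:
--         return [p[0] for p in sub_id_focus_pair_list]
--     return [p[0] for p in sub_id_focus_pair_list[:cut + 1]]
-- ===== Notes on version B (the rewrite author's own statement) =====
-- stated objective: simpler
-- what changed: B separates boundary-finding from result construction: it first locates the cutoff index of the first pair with focus below the threshold, then returns the ids projected from the inclusive prefix slice, instead of accumulating ids and breaking inside one loop.
import Mathlib
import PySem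

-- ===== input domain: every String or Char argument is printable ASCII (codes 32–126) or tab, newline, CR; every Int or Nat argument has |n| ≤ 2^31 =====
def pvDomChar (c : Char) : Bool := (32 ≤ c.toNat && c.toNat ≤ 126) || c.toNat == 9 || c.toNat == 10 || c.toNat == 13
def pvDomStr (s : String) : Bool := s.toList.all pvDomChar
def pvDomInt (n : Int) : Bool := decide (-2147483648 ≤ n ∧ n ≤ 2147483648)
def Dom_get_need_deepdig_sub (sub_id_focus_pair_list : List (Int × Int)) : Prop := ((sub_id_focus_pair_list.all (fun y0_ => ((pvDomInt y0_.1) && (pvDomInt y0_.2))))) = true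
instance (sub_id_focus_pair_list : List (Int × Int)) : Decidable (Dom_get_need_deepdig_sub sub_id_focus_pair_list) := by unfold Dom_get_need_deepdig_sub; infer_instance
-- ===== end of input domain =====

-- B separates boundary-finding (index of the first pair with focus < 3) from result
-- construction (project ids from the inclusive prefix), instead of A's accumulate-and-break loop.

-- ===== PORT A =====
-- A's loop: append sub_id, break when focus_num < focus_value (= 3).
def get_need_deepdig_sub (sub_id_focus_pair_list : List (Int × Int)) : List Int :=
  match sub_id_focus_pair_list with
  | [] => []
  | p :: rest =>
    p.1 :: (if p.2 < 3 then [] else get_need_deepdig_sub rest)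

-- ===== PORT B =====
-- index of the first pair whose second component is < 3 (Source B's next(... enumerate ...))
def pvCutIdx (l : List (Int × Int)) : Option Nat :=
  match l with
  | [] => none
  | p :: rest => if p.2 < 3 then some 0 else (pvCutIdx rest).map (· + 1)

def get_need_deepdig_sub_alt (sub_id_focus_pair_list : List (Int × Int)) : List Int :=
  match pvCutIdx sub_id_focus_pair_list with
  | none => sub_id_focus_pair_list.map Prod.fst
  | some i => (sub_id_focus_pair_list.take (i + 1)).map Prod.fst

-- ===== PRECONDITION & SPEC =====
def Spec_get_need_deepdig_sub (sub_id_focus_pair_list : List (Int × Int)) (out : List Int) : Prop := out = get_need_deepdig_sub_alt sub_id_focus_pair_list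
instance (sub_id_focus_pair_list : List (Int × Int)) (out : List Int) : Decidable (Spec_get_need_deepdig_sub sub_id_focus_pair_list out) := by unfold Spec_get_need_deepdig_sub; infer_instance

-- ===== CLAIM (what is proved, stated in full; the proofs are below) =====
def Claim_equal_get_need_deepdig_sub : Prop := ∀ (sub_id_focus_pair_list : List (Int × Int)), Dom_get_need_deepdig_sub sub_id_focus_pair_list → Spec_get_need_deepdig_sub sub_id_focus_pair_list (get_need_deepdig_sub sub_id_focus_pair_list)

-- ===== LEMMAS AND PROOFS =====
theorem get_need_deepdig_sub_eq_alt (l : List (Int × Int)) :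
    get_need_deepdig_sub l = get_need_deepdig_sub_alt l := by
  induction l with
  | nil => rfl
  | cons p rest ih =>
    by_cases h : p.2 < 3
    · simp [get_need_deepdig_sub, get_need_deepdig_sub_alt, pvCutIdx, h]
    · cases hc : pvCutIdx rest with
      | none =>
        simp [get_need_deepdig_sub, get_need_deepdig_sub_alt, pvCutIdx, h, hc, ih,
          get_need_deepdig_sub_alt]
      | some i =>
        simp only [get_need_deepdig_sub, get_need_deepdig_sub_alt, pvCutIdx, h, hc,
          Option.map_some] at *
        simp [ih, List.take]

-- ===== VERDICT (by name: the statement is the Claim_ definition above) =====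
theorem get_need_deepdig_sub_spec : Claim_equal_get_need_deepdig_sub := by
  intro l _
  exact get_need_deepdig_sub_eq_alt l
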